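-- pv_equiv track=rewrite | github.com/mlazic95/receiptScanning | data_extraction.py | findDate
-- ===== SOURCE A (Python) =====
-- def findDate(labels, words):
--   date = ''
--   for i in range(len(labels)):
--     if labels[i] == 'date':
--       date += words[i]
--     elif date != '':
--       return date
--   return None
-- ===== SOURCE B (Python) =====
-- def findDate(labels, words):
--     # Phase 1: split the label sequence into maximal runs of equal labels,
--     # recorded as (label, start, end) index spans.
--     runs = []
--     i = 0
--     n = len(labels)
--     while i < n:
--         j = i
--         while j < n and labels[j] == labels[i]:
--             j += 1
--         runs.append((labels[i], i, j))
--         i = j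
--     # Phase 2: scan the runs, concatenating words over date runs; a non-date
--     # run seen with a nonempty accumulator ends the scan.
--     acc = ''
--     for lab, s, e in runs:
--         if lab == 'date':
--             for k in range(s, e):
--                 acc += words[k]
--         elif acc:
--             return acc
--     return None
-- ===== Notes on version B (the rewrite author's own statement) =====
-- stated objective: alternative
-- what changed: B first splits the label sequence into maximal runs of equal labels with their index spans, then scans the run list, instead of A's single indexed loop over individual labels.
import Mathlib
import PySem

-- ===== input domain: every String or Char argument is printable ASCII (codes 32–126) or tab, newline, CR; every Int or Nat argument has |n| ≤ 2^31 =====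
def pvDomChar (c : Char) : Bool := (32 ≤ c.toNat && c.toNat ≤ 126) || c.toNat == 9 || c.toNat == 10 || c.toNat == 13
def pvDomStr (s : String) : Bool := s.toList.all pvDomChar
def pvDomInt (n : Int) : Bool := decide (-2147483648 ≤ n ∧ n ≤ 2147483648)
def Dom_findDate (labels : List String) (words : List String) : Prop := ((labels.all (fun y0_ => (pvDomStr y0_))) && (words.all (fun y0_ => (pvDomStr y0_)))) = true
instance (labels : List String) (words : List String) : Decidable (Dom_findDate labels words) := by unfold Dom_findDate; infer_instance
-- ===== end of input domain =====

-- B re-decomposes A's single indexed scan into two phases: build maximal runs of equal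
-- labels as (label, start, end) spans, then fold over that run list (objective: alternative).

-- ===== PORT A =====
-- A's for-loop over range(len(labels)); IndexError on words[i] is modelled by `none`,
-- excluded by Pre_findDate.
def findDateLoop (labels : List String) (words : List String) (i : Nat) (date : String) : Option String :=
  if i < labels.length then
    if labels.getD i "" = "date" then
      match PySem.List.pyGet? words (Int.ofNat i) with
      | some w => findDateLoop labels words (i+1) (date ++ w)
      | none => none        -- IndexError (outside Pre_findDate)
    else if date ≠ "" then some date
    else findDateLoop labels words (i+1) date
  else none
termination_by labels.length - i

def findDate (labels : List String) (words : List String) : Option String :=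
  findDateLoop labels words 0 ""

-- ===== PORT B =====
-- inner `while j < n and labels[j] == labels[i]` of Source B
def runEnd (labels : List String) (lab : String) (j : Nat) : Nat :=
  if j < labels.length ∧ labels.getD j "" = lab then runEnd labels lab (j+1) else j
termination_by labels.length - j
decreasing_by omega

theorem runEnd_gt (labels : List String) (lab : String) (j : Nat)
    (h : j < labels.length) (he : labels.getD j "" = lab) : j < runEnd labels lab j := by
  rw [runEnd]
  simp only [h, he, and_self, if_true]
  have := runEnd_ge labels lab (j+1)
  omega
where
  runEnd_ge (labels : List String) (lab : String) (j : Nat) : j ≤ runEnd labels lab j := by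
    rw [runEnd]
    split
    · have := runEnd_ge labels lab (j+1); omega
    · exact le_refl _
termination_by labels.length - j
decreasing_by all_goals omega

-- outer while of phase 1 of Source B: the run list from index i on
def buildRuns (labels : List String) (i : Nat) : List (String × Nat × Nat) :=
  if h : i < labels.length then
    let lab := labels.getD i ""
    let j := runEnd labels lab i
    (lab, i, j) :: buildRuns labels j
  else []
termination_by labels.length - i
decreasing_by
  have := runEnd_gt labels (labels.getD i "") i h rfl
  omega

-- inner `for k in range(s, e): acc += words[k]` of phase 2; none = IndexError
def appendRun (words : List String) (s e : Nat) (acc : String) : Option String :=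
  if s < e then
    match PySem.List.pyGet? words (Int.ofNat s) with
    | some w => appendRun words (s+1) e (acc ++ w)
    | none => none
  else some acc
termination_by e - s

-- phase 2 of Source B: fold over the run list
def scanRuns (words : List String) (runs : List (String × Nat × Nat)) (acc : String) : Option String :=
  match runs with
  | [] => none
  | (lab, s, e) :: rest =>
    if lab = "date" then
      match appendRun words s e acc with
      | some acc' => scanRuns words rest acc'
      | none => none          -- IndexError (outside Pre_findDate)
    else if acc ≠ "" then some acc
    else scanRuns words rest acc

def findDate_alt (labels : List String) (words : List String) : Option String :=
  scanRuns words (buildRuns labels 0) ""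

-- ===== PRECONDITION & SPEC =====
-- Pre_ excludes exactly the inputs on which A raises IndexError (a 'date' label at an
-- index beyond len(words) that the scan reaches before any early return).
def Pre_findDate (labels : List String) (words : List String) : Prop :=
  ∀ i < labels.length, labels.getD i "" = "date" →
    i < words.length ∨
      ∃ j < i, labels.getD j "" ≠ "date" ∧ ∃ m < j, labels.getD m "" = "date" ∧ words.getD m "" ≠ ""
instance (labels : List String) (words : List String) : Decidable (Pre_findDate labels words) := by
  unfold Pre_findDate; infer_instance

def pvWitness_findDate : List String × List String := (["date", "total"], ["01/02", "5.00"])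

def Spec_findDate (labels : List String) (words : List String) (out : Option String) : Prop := out = findDate_alt labels words
instance (labels : List String) (words : List String) (out : Option String) : Decidable (Spec_findDate labels words out) := by unfold Spec_findDate; infer_instance

-- ===== CLAIM (what is proved, stated in full; the proofs are below) =====
def Claim_equal_findDate : Prop := ∀ (labels : List String) (words : List String), Dom_findDate labels words → Pre_findDate labels words → Spec_findDate labels words (findDate labels words)

-- ===== LEMMAS AND PROOFS =====

theorem runEnd_le (labels : List String) (lab : String) (j : Nat) (h : j ≤ labels.length) :
    runEnd labels lab j ≤ labels.length := by
  rw [runEnd]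
  split
  · exact runEnd_le labels lab (j+1) (by omega)
  · exact h
termination_by labels.length - j
decreasing_by omega

theorem runEnd_mem (labels : List String) (lab : String) (j : Nat) :
    ∀ k, j ≤ k → k < runEnd labels lab j → labels.getD k "" = lab := by
  intro k hk hlt
  rw [runEnd] at hlt
  split at hlt
  · rcases Nat.eq_or_lt_of_le hk with h | h
    · subst h; exact (by assumption : _ ∧ _).2
    · exact runEnd_mem labels lab (j+1) k h hlt
  · omega
termination_by labels.length - j
decreasing_by omega

-- A's loop across a block of 'date'-labelled indices behaves like appendRun then resume.
theorem loop_date_run (labels words : List String) (j s : Nat) (date : String)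
    (hj : j ≤ labels.length) (hs : s ≤ j)
    (hall : ∀ k, s ≤ k → k < j → labels.getD k "" = "date") :
    findDateLoop labels words s date =
      (match appendRun words s j date with
       | some d => findDateLoop labels words j d
       | none => none) := by
  rcases Nat.eq_or_lt_of_le hs with h | h
  · subst h
    rw [appendRun]; simp
  · rw [findDateLoop, appendRun]
    have hsn : s < labels.length := by omega
    have hlab : labels.getD s "" = "date" := hall s (le_refl s) h
    simp only [hsn, hlab, h, if_pos]
    cases PySem.List.pyGet? words (Int.ofNat s) with
    | none => rfl
    | some w =>
      exact loop_date_run labels words j (s+1) (date ++ w) hj h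
        (fun k hk hk2 => hall k (by omega) hk2)
termination_by j - s
decreasing_by omega

-- A's loop skips a block of non-'date' indices when the accumulator is empty.
theorem loop_skip_run (labels words : List String) (j s : Nat) (lab : String)
    (hj : j ≤ labels.length) (hlab : lab ≠ "date") (hs : s ≤ j)
    (hall : ∀ k, s ≤ k → k < j → labels.getD k "" = lab) :
    findDateLoop labels words s "" = findDateLoop labels words j "" := by
  rcases Nat.eq_or_lt_of_le hs with h | h
  · subst h; rfl
  · rw [findDateLoop]
    have hsn : s < labels.length := by omega
    have hl : labels.getD s "" = lab := hall s (le_refl s) h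
    simp only [hsn, hl, hlab, ne_eq, not_true_eq_false, if_false, if_true]
    exact loop_skip_run labels words j (s+1) lab hj hlab h (fun k hk hk2 => hall k (by omega) hk2)
termination_by j - s
decreasing_by omega

theorem loop_eq_scan (labels words : List String) (i : Nat) (hi : i ≤ labels.length) (date : String) :
    findDateLoop labels words i date = scanRuns words (buildRuns labels i) date := by
  rw [buildRuns]
  by_cases h : i < labels.length
  · rw [dif_pos h]
    have hij : i < runEnd labels (labels.getD i "") i := runEnd_gt labels _ i h rfl
    have hjn : runEnd labels (labels.getD i "") i ≤ labels.length :=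
      runEnd_le labels _ i (by omega)
    show findDateLoop labels words i date =
      scanRuns words ((labels.getD i "", i, runEnd labels (labels.getD i "") i)
        :: buildRuns labels (runEnd labels (labels.getD i "") i)) date
    rw [scanRuns]
    by_cases hd : labels.getD i "" = "date"
    · rw [if_pos hd]
      rw [loop_date_run labels words (runEnd labels (labels.getD i "") i) i date hjn
        (le_of_lt hij) (fun k hk hk2 => hd ▸ runEnd_mem labels _ i k hk hk2)]
      cases happ : appendRun words i (runEnd labels (labels.getD i "") i) date with
      | none => rfl
      | some d =>
        exact loop_eq_scan labels words (runEnd labels (labels.getD i "") i) hjn d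
    · rw [if_neg hd]
      by_cases hne : date ≠ ""
      · rw [if_pos hne, findDateLoop, if_pos h, if_neg hd, if_pos hne]
      · rw [if_neg hne]
        have hne' : date = "" := by simpa using hne
        subst hne'
        rw [loop_skip_run labels words (runEnd labels (labels.getD i "") i) i
          (labels.getD i "") hjn hd (le_of_lt hij) (runEnd_mem labels _ i)]
        exact loop_eq_scan labels words (runEnd labels (labels.getD i "") i) hjn ""
  · rw [dif_neg h, findDateLoop, if_neg h, scanRuns]
termination_by labels.length - i
decreasing_by all_goals omega

-- ===== VERDICT (by name: the statement is the Claim_ definition above) =====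
theorem findDate_spec : Claim_equal_findDate := by
  intro labels words _ _
  unfold Spec_findDate findDate findDate_alt
  exact loop_eq_scan labels words 0 (Nat.zero_le _) ""
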